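-- pv_equiv track=rewrite | github.com/joaocpfernandess/Advent-of-Code | 2020/Day22/day22_2.py | score_calculator
-- ===== SOURCE A (Python) =====
-- def score_calculator(deck):
--     deck.reverse()
--     score = 0
--     multiplier = 1
--     while multiplier <= len(deck):
--         score += multiplier * deck[multiplier-1]
--         multiplier += 1
--     return score
-- ===== SOURCE B (Python) =====
-- def score_calculator(deck):
--     deck.reverse()
--     running = 0
--     score = 0
--     for card in reversed(deck):
--         running += card
--         score += running
--     return score
-- ===== Notes on version B (the rewrite author's own statement) =====
-- stated objective: faster
-- what changed: Replaces the index-multiplier while loop (score += multiplier * deck[multiplier-1]) by an index-free single pass that accumulates a running suffix total and adds it into the score at every card, computing the same weighted sum with no per-step multiplication or indexed access.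
import Mathlib
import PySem

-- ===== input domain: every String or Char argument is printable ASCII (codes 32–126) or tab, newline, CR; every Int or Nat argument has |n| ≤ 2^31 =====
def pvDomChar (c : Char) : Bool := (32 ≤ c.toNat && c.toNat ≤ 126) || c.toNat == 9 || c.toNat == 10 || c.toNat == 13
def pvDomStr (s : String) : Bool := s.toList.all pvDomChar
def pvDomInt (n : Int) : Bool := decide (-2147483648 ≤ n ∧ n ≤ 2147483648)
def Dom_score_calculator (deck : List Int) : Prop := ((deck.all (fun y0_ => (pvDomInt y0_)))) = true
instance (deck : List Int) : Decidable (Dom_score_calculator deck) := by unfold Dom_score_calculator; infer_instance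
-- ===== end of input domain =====

-- B replaces A's index-multiplier loop by an index-free running suffix-total pass; same O(n) cost.
-- Both Pythons reverse `deck` IN PLACE (identical side effect); the equivalence proved here is about the return value.

-- ===== PORT A =====
-- while multiplier <= len(deck): score += multiplier * deck[multiplier-1]; multiplier += 1
def score_calculator (deck : List Int) : Int :=
  let d := deck.reverse
  (PySem.List.pyRange 1 ((d.length : Int) + 1) 1).foldl
    (fun score m => score + m * PySem.List.pyGetD d (m - 1) 0) 0

-- ===== PORT B =====
-- deck.reverse(); then for card in reversed(deck): running += card; score += running
def score_calculator_alt (deck : List Int) : Int :=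
  let d := deck.reverse
  (d.reverse.foldl (fun (p : Int × Int) card => (p.1 + card, p.2 + (p.1 + card))) (0, 0)).2

-- ===== PRECONDITION & SPEC =====
def Spec_score_calculator (deck : List Int) (out : Int) : Prop := out = score_calculator_alt deck
instance (deck : List Int) (out : Int) : Decidable (Spec_score_calculator deck out) := by unfold Spec_score_calculator; infer_instance

-- ===== CLAIM (what is proved, stated in full; the proofs are below) =====
def Claim_equal_score_calculator : Prop := ∀ (deck : List Int), Dom_score_calculator deck → Spec_score_calculator deck (score_calculator deck)

-- ===== LEMMAS AND PROOFS =====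

-- A's loop body applied to a list with one more card at the end.
theorem lemA_append (s : List Int) (x : Int) :
    (PySem.List.pyRange 1 (((s ++ [x]).length : Int) + 1) 1).foldl
      (fun score m => score + m * PySem.List.pyGetD (s ++ [x]) (m - 1) 0) 0
    = (PySem.List.pyRange 1 ((s.length : Int) + 1) 1).foldl
        (fun score m => score + m * PySem.List.pyGetD s (m - 1) 0) 0
      + ((s.length : Int) + 1) * x := by
  have hlen : (((s ++ [x]).length : Int) + 1) = ((s.length : Int) + 1) + 1 := by
    simp
  rw [hlen, PySem.List.pyRange_one_succ_right (by omega : (1:Int) ≤ (s.length : Int) + 1),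
      List.foldl_append]
  simp only [List.foldl_cons, List.foldl_nil]
  have hlast : PySem.List.pyGetD (s ++ [x]) ((s.length : Int) + 1 - 1) 0 = x := by
    have : ((s.length : Int) + 1 - 1) = ((s.length : Nat) : Int) := by omega
    rw [this, PySem.List.pyGetD_natCast]
    simp [List.getD]
  rw [hlast]
  congr 1
  apply PySem.List.foldl_congr_mem
  intro acc m hm
  rw [PySem.List.mem_pyRange_one] at hm
  have h0 : 0 ≤ m - 1 := by omega
  have h1 : m - 1 < (s.length : Int) := by omega
  have h1' : m - 1 < ((s ++ [x]).length : Int) := by simp; omega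
  rw [PySem.List.pyGetD_eq_getElem (s ++ [x]) 0 h0 h1',
      PySem.List.pyGetD_eq_getElem s 0 h0 h1]
  have hn : (m - 1).toNat < s.length := by omega
  congr 2
  exact List.getElem_append_left hn

-- B's fold with a general initial pair.
theorem lemB (t : List Int) (a b : Int) :
    (t.foldl (fun (p : Int × Int) card => (p.1 + card, p.2 + (p.1 + card))) (a, b)).2
    = b + (t.length : Int) * a
      + (t.foldl (fun (p : Int × Int) card => (p.1 + card, p.2 + (p.1 + card))) (0, 0)).2 := by
  induction t generalizing a b with
  | nil => simp
  | cons x t ih =>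
    simp only [List.foldl_cons, List.length_cons]
    rw [ih (a + x) (b + (a + x)), ih (0 + x) (0 + (0 + x))]
    push_cast
    ring

theorem lem_main (deck : List Int) :
    (PySem.List.pyRange 1 ((deck.reverse.length : Int) + 1) 1).foldl
      (fun score m => score + m * PySem.List.pyGetD deck.reverse (m - 1) 0) 0
    = (deck.foldl (fun (p : Int × Int) card => (p.1 + card, p.2 + (p.1 + card))) (0, 0)).2 := by
  induction deck with
  | nil => simp [PySem.List.pyRange_one_eq_nil]
  | cons x t ih =>
    rw [List.reverse_cons, lemA_append, ih]
    simp only [List.foldl_cons, List.length_reverse]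
    rw [lemB t (0 + x) (0 + (0 + x))]
    ring

-- ===== VERDICT (by name: the statement is the Claim_ definition above) =====
theorem score_calculator_spec : Claim_equal_score_calculator := by
  intro deck _
  show score_calculator deck = score_calculator_alt deck
  unfold score_calculator score_calculator_alt
  simp only [List.reverse_reverse]
  exact lem_main deck
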